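-- pv_equiv track=rewrite | github.com/anupb08/Bank_Form_ICR | postprocess.py | process_company_address
-- ===== SOURCE A (Python) =====
-- addrs = {
--         0: 'House/Plot No',
--         1: 'Floor',
--         2: 'Apartment/Building Name',
--         3: 'Line 2',
--         4: 'Line 3',
--         5: 'Street/Road',
--         6: 'Landmark',
--         7: 'City/Town/Village',
--         8: 'Sector/Locality',
--         9: 'District',
--         10:'State/U.T. Code',
--         11: 'ISo 3316 Country Code',
--         12: 'PIN/Post Code',
--         13: 'State',
--         14:'STD Code',
--         15:'Tel',
--         16:'Mobile'
--         }
--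
-- def process_company_address(string):
--     address = {}
--     texts_line = string.split('\n')
--     address['Company Address'] = texts_line[0].replace('"', '').replace(',,,', '')
--     for texts in texts_line[1:]:
--         texts = texts.replace(';' , ' ')
--         for text in texts.split(',,,'):
--             fields = text.split('"')
--             if len(fields) < 2:
--                 continue
--             if 'landmark' in text.lower():
--                 address[addrs[6]] = text.split('"')[1]
--             elif 'city' in text.lower() or 'town' in text.lower():
--                 address[addrs[7]] = text.split('"')[1]
--             elif 'sector' in text.lower() or 'locality' in text.lower():
--                 address[addrs[8]] = text.split('"')[1]
--             elif 'district' in text.lower():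
--                 address[addrs[9]] = text.split('"')[1]
--             elif 'U.T. code' in text.lower():
--                 address[addrs[10]] = text.split('"')[1]
--             elif 'coutry code' in text.lower():
--                 address[addrs[11]] = text.split('"')[1]
--             elif 'post code' in text.lower() or 'pin' in text.lower():
--                 address[addrs[12]] = text.split('"')[1]
--             elif 'state*' in text.lower():
--                 address[addrs[13]] = text.split('"')[1]
--             elif 'std code' in text.lower():
--                 address[addrs[14]] = text.split('"')[1]
--             elif 'tel' in text.lower():
--                 address[addrs[15]] = text.split('"')[1]
--             elif 'mobile' in text.lower():
--                 address[addrs[16]] = text.split('"')[1]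
--     #if len(texts_line) >= 6:
--     #    pan = texts_line[5].split(';')
--     #    address['PAN No. of Applicant'] = pan[0]
--     #    address['PAN No. of Co Applicant'] = pan[1]
--
--     return address
-- ===== SOURCE B (Python) =====
-- addrs = {
--         0: 'House/Plot No',
--         1: 'Floor',
--         2: 'Apartment/Building Name',
--         3: 'Line 2',
--         4: 'Line 3',
--         5: 'Street/Road',
--         6: 'Landmark',
--         7: 'City/Town/Village',
--         8: 'Sector/Locality',
--         9: 'District',
--         10:'State/U.T. Code',
--         11: 'ISo 3316 Country Code',
--         12: 'PIN/Post Code',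
--         13: 'State',
--         14:'STD Code',
--         15:'Tel',
--         16:'Mobile'
--         }
--
-- # keyword -> field index; A's elif chain assigns strictly increasing field indices,
-- # so "first matching elif branch" == "minimum field index over all matching keywords"
-- KW = {
--     'landmark': 6, 'city': 7, 'town': 7, 'sector': 8, 'locality': 8,
--     'district': 9, 'U.T. code': 10, 'coutry code': 11, 'post code': 12,
--     'pin': 12, 'state*': 13, 'std code': 14, 'tel': 15, 'mobile': 16,
-- }
--
-- def _classify(chunk):
--     """(key, value) event for a chunk, or None if it sets nothing."""
--     fields = chunk.split('"')
--     if len(fields) < 2: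
--         return None
--     low = chunk.lower()
--     hits = [i for kw, i in KW.items() if kw in low]
--     if not hits:
--         return None
--     return (addrs[min(hits)], fields[1])
--
-- def process_company_address(string):
--     lines = string.split('\n')
--     events = [e
--               for line in lines[1:]
--               for chunk in line.replace(';', ' ').split(',,,')
--               for e in [_classify(chunk)]
--               if e is not None]
--     address = {'Company Address': lines[0].replace('"', '').replace(',,,', '')}
--     address.update(events)
--     return address
-- ===== Notes on version B (the rewrite author's own statement) =====
-- stated objective: alternative
-- what changed: Replaces A's mutate-a-dict-inside-an-11-branch-elif-chain by a two-stage pipeline: a comprehension first classifies every chunk into an optional (key, value) event by taking the MINIMUM field index over all matching keywords of a flat keyword->index map (correct because the elif branches assign strictly increasing indices, so min = first match), then a single dict.update of the event list replaces the incremental insertions.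
import Mathlib
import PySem

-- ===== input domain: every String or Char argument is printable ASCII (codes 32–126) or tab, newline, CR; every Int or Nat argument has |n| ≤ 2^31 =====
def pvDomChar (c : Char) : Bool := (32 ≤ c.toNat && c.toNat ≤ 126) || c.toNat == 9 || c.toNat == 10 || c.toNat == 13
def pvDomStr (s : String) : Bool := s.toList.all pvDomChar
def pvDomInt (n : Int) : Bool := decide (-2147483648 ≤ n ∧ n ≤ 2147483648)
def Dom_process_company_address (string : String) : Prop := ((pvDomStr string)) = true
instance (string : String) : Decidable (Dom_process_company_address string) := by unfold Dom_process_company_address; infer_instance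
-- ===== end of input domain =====

-- B replaces A's mutate-a-dict-inside-an-elif-chain by a two-stage pipeline: classify each
-- chunk to an optional event via a min-index keyword map, then one bulk dict update
-- (objective: alternative decomposition; return value only, no side effects).

-- ===== PORT A =====
-- s.split(sep) for a NONEMPTY literal sep (PySem.Str.split? is none only for sep = ""): exact
def pvSplit (s sep : String) : List String := (PySem.Str.split? s sep).getD []

-- the module-level 'addrs' dict
def pvAddrs : PySem.Dict Int String := PySem.Dict.mk [
  (0, "House/Plot No"), (1, "Floor"), (2, "Apartment/Building Name"), (3, "Line 2"),
  (4, "Line 3"), (5, "Street/Road"), (6, "Landmark"), (7, "City/Town/Village"),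
  (8, "Sector/Locality"), (9, "District"), (10, "State/U.T. Code"),
  (11, "ISo 3316 Country Code"), (12, "PIN/Post Code"), (13, "State"),
  (14, "STD Code"), (15, "Tel"), (16, "Mobile")]

-- body of A's inner 'for text in texts.split(',,,')' loop (the if/elif chain)
def pvStepA (address : PySem.Dict String String) (text : String) : PySem.Dict String String :=
  let fields := pvSplit text "\""
  if fields.length < 2 then address
  else if PySem.Str.isIn "landmark" (PySem.Str.lower text) then
    address.insert (pvAddrs.getD 6 "") (PySem.List.pyGetD (pvSplit text "\"") 1 "")
  else if PySem.Str.isIn "city" (PySem.Str.lower text) || PySem.Str.isIn "town" (PySem.Str.lower text) then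
    address.insert (pvAddrs.getD 7 "") (PySem.List.pyGetD (pvSplit text "\"") 1 "")
  else if PySem.Str.isIn "sector" (PySem.Str.lower text) || PySem.Str.isIn "locality" (PySem.Str.lower text) then
    address.insert (pvAddrs.getD 8 "") (PySem.List.pyGetD (pvSplit text "\"") 1 "")
  else if PySem.Str.isIn "district" (PySem.Str.lower text) then
    address.insert (pvAddrs.getD 9 "") (PySem.List.pyGetD (pvSplit text "\"") 1 "")
  else if PySem.Str.isIn "U.T. code" (PySem.Str.lower text) then
    address.insert (pvAddrs.getD 10 "") (PySem.List.pyGetD (pvSplit text "\"") 1 "")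
  else if PySem.Str.isIn "coutry code" (PySem.Str.lower text) then
    address.insert (pvAddrs.getD 11 "") (PySem.List.pyGetD (pvSplit text "\"") 1 "")
  else if PySem.Str.isIn "post code" (PySem.Str.lower text) || PySem.Str.isIn "pin" (PySem.Str.lower text) then
    address.insert (pvAddrs.getD 12 "") (PySem.List.pyGetD (pvSplit text "\"") 1 "")
  else if PySem.Str.isIn "state*" (PySem.Str.lower text) then
    address.insert (pvAddrs.getD 13 "") (PySem.List.pyGetD (pvSplit text "\"") 1 "")
  else if PySem.Str.isIn "std code" (PySem.Str.lower text) then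
    address.insert (pvAddrs.getD 14 "") (PySem.List.pyGetD (pvSplit text "\"") 1 "")
  else if PySem.Str.isIn "tel" (PySem.Str.lower text) then
    address.insert (pvAddrs.getD 15 "") (PySem.List.pyGetD (pvSplit text "\"") 1 "")
  else if PySem.Str.isIn "mobile" (PySem.Str.lower text) then
    address.insert (pvAddrs.getD 16 "") (PySem.List.pyGetD (pvSplit text "\"") 1 "")
  else address

def process_company_address (string : String) : List (String × String) :=
  let texts_line := pvSplit string "\n"
  let address : PySem.Dict String String :=
    (PySem.Dict.empty).insert "Company Address"
      (PySem.Str.replace (PySem.Str.replace (PySem.List.pyGetD texts_line 0 "") "\"" "") ",,," "")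
  let address := (texts_line.drop 1).foldl (fun address texts =>
    (pvSplit (PySem.Str.replace texts ";" " ") ",,,").foldl pvStepA address) address
  address.items

-- ===== PORT B =====
-- the flat KW keyword -> field-index map (insertion order as in Source B)
def pvKW : List (String × Int) := [
  ("landmark", 6), ("city", 7), ("town", 7), ("sector", 8), ("locality", 8),
  ("district", 9), ("U.T. code", 10), ("coutry code", 11), ("post code", 12),
  ("pin", 12), ("state*", 13), ("std code", 14), ("tel", 15), ("mobile", 16)]

-- the hits comprehension '[i for kw, i in KW.items() if kw in low]' (over a general map l)
def pvHitsOf (l : List (String × Int)) (low : String) : List Int :=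
  l.filterMap (fun p => if PySem.Str.isIn p.1 low then some p.2 else none)

-- Source B's _classify: the (key, value) event for a chunk, or none
def pvClassify (chunk : String) : Option (String × String) :=
  if (pvSplit chunk "\"").length < 2 then none
  else
    match PySem.List.min? (pvHitsOf pvKW (PySem.Str.lower chunk)) (fun x => x) with
    | none => none
    | some m => some (pvAddrs.getD m "", PySem.List.pyGetD (pvSplit chunk "\"") 1 "")

def process_company_address_alt (string : String) : List (String × String) :=
  let lines := pvSplit string "\n"
  let events := (lines.drop 1).flatMap (fun line =>
    (pvSplit (PySem.Str.replace line ";" " ") ",,,").filterMap pvClassify)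
  let address : PySem.Dict String String :=
    (PySem.Dict.empty).insert "Company Address"
      (PySem.Str.replace (PySem.Str.replace (PySem.List.pyGetD lines 0 "") "\"" "") ",,," "")
  (events.foldl (fun d e => d.insert e.1 e.2) address).items

-- ===== PRECONDITION & SPEC =====
def Spec_process_company_address (string : String) (out : List (String × String)) : Prop := out = process_company_address_alt string
instance (string : String) (out : List (String × String)) : Decidable (Spec_process_company_address string out) := by unfold Spec_process_company_address; infer_instance

-- ===== CLAIM (what is proved, stated in full; the proofs are below) =====
def Claim_equal_process_company_address : Prop := ∀ (string : String), Dom_process_company_address string → Spec_process_company_address string (process_company_address string)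

-- ===== LEMMAS AND PROOFS =====

theorem pvHitsOf_pos (kw : String) (i : Int) (rest : List (String × Int)) (low : String)
    (h : PySem.Str.isIn kw low = true) :
    pvHitsOf ((kw, i) :: rest) low = i :: pvHitsOf rest low := by
  simp only [pvHitsOf, List.filterMap_cons, h]; rfl

theorem pvHitsOf_neg (kw : String) (i : Int) (rest : List (String × Int)) (low : String)
    (h : PySem.Str.isIn kw low = false) :
    pvHitsOf ((kw, i) :: rest) low = pvHitsOf rest low := by
  simp only [pvHitsOf, List.filterMap_cons, h]; rfl

theorem pvHitsOf_nil (low : String) : pvHitsOf [] low = [] := rfl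

-- every hit of l is bounded below by a bound on l's indices
theorem pvHitsOf_lb (l : List (String × Int)) (low : String) (c : Int)
    (h : ∀ p ∈ l, c ≤ p.2) : ∀ x ∈ pvHitsOf l low, c ≤ x := by
  intro x hx
  simp only [pvHitsOf, List.mem_filterMap] at hx
  obtain ⟨p, hp, hpx⟩ := hx
  by_cases hc : PySem.Str.isIn p.1 low = true
  · rw [if_pos hc] at hpx
    cases hpx
    exact h p hp
  · rw [if_neg hc] at hpx
    cases hpx

theorem foldl_min_of_lb (t : List Int) (a : Int) (h : ∀ x ∈ t, a ≤ x) :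
    t.foldl min a = a := by
  induction t generalizing a with
  | nil => rfl
  | cons x t ih =>
      simp only [List.foldl_cons]
      rw [min_eq_left (h x (by simp))]
      exact ih a (fun y hy => h y (by simp [hy]))

-- min of a cons whose head is a lower bound of the tail is the head
theorem min?_cons_of_lb (a : Int) (t : List Int) (h : ∀ x ∈ t, a ≤ x) :
    PySem.List.min? (a :: t) (fun x => x) = some a := by
  rw [PySem.List.min?_id_cons, foldl_min_of_lb t a h]

theorem pvStep_classify (address : PySem.Dict String String) (text : String) :
    pvStepA address text =
      match pvClassify text with
      | some e => address.insert e.1 e.2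
      | none => address := by
  unfold pvStepA pvClassify
  by_cases hlen : (pvSplit text "\"").length < 2
  · rw [if_pos hlen, if_pos hlen]
  · rw [if_neg hlen, if_neg hlen]
    simp only [pvKW]
    by_cases h0 : PySem.Str.isIn "landmark" (PySem.Str.lower text) = true
    · rw [if_pos h0]
      rw [pvHitsOf_pos _ _ _ _ h0, min?_cons_of_lb _ _ (pvHitsOf_lb _ _ _ (by decide))]
    · rw [if_neg h0]
      rw [Bool.not_eq_true] at h0
      by_cases h1 : (PySem.Str.isIn "city" (PySem.Str.lower text) || PySem.Str.isIn "town" (PySem.Str.lower text)) = true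
      · rw [if_pos h1]
        by_cases h1a : PySem.Str.isIn "city" (PySem.Str.lower text) = true
        · rw [pvHitsOf_neg _ _ _ _ h0, pvHitsOf_pos _ _ _ _ h1a, min?_cons_of_lb _ _ (pvHitsOf_lb _ _ _ (by decide))]
        · rw [Bool.not_eq_true] at h1a
          have h1b : PySem.Str.isIn "town" (PySem.Str.lower text) = true := by
            rcases Bool.or_eq_true_iff.mp h1 with h | h
            · rw [h1a] at h; exact absurd h (by simp)
            · exact h
          rw [pvHitsOf_neg _ _ _ _ h0, pvHitsOf_neg _ _ _ _ h1a, pvHitsOf_pos _ _ _ _ h1b, min?_cons_of_lb _ _ (pvHitsOf_lb _ _ _ (by decide))]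
      · rw [if_neg h1]
        rw [Bool.not_eq_true] at h1
        obtain ⟨h1a, h1b⟩ := Bool.or_eq_false_iff.mp h1
        by_cases h2 : (PySem.Str.isIn "sector" (PySem.Str.lower text) || PySem.Str.isIn "locality" (PySem.Str.lower text)) = true
        · rw [if_pos h2]
          by_cases h2a : PySem.Str.isIn "sector" (PySem.Str.lower text) = true
          · rw [pvHitsOf_neg _ _ _ _ h0, pvHitsOf_neg _ _ _ _ h1a, pvHitsOf_neg _ _ _ _ h1b, pvHitsOf_pos _ _ _ _ h2a, min?_cons_of_lb _ _ (pvHitsOf_lb _ _ _ (by decide))]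
          · rw [Bool.not_eq_true] at h2a
            have h2b : PySem.Str.isIn "locality" (PySem.Str.lower text) = true := by
              rcases Bool.or_eq_true_iff.mp h2 with h | h
              · rw [h2a] at h; exact absurd h (by simp)
              · exact h
            rw [pvHitsOf_neg _ _ _ _ h0, pvHitsOf_neg _ _ _ _ h1a, pvHitsOf_neg _ _ _ _ h1b, pvHitsOf_neg _ _ _ _ h2a, pvHitsOf_pos _ _ _ _ h2b, min?_cons_of_lb _ _ (pvHitsOf_lb _ _ _ (by decide))]
        · rw [if_neg h2]
          rw [Bool.not_eq_true] at h2
          obtain ⟨h2a, h2b⟩ := Bool.or_eq_false_iff.mp h2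
          by_cases h3 : PySem.Str.isIn "district" (PySem.Str.lower text) = true
          · rw [if_pos h3]
            rw [pvHitsOf_neg _ _ _ _ h0, pvHitsOf_neg _ _ _ _ h1a, pvHitsOf_neg _ _ _ _ h1b, pvHitsOf_neg _ _ _ _ h2a, pvHitsOf_neg _ _ _ _ h2b, pvHitsOf_pos _ _ _ _ h3, min?_cons_of_lb _ _ (pvHitsOf_lb _ _ _ (by decide))]
          · rw [if_neg h3]
            rw [Bool.not_eq_true] at h3
            by_cases h4 : PySem.Str.isIn "U.T. code" (PySem.Str.lower text) = true
            · rw [if_pos h4]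
              rw [pvHitsOf_neg _ _ _ _ h0, pvHitsOf_neg _ _ _ _ h1a, pvHitsOf_neg _ _ _ _ h1b, pvHitsOf_neg _ _ _ _ h2a, pvHitsOf_neg _ _ _ _ h2b, pvHitsOf_neg _ _ _ _ h3, pvHitsOf_pos _ _ _ _ h4, min?_cons_of_lb _ _ (pvHitsOf_lb _ _ _ (by decide))]
            · rw [if_neg h4]
              rw [Bool.not_eq_true] at h4
              by_cases h5 : PySem.Str.isIn "coutry code" (PySem.Str.lower text) = true
              · rw [if_pos h5]
                rw [pvHitsOf_neg _ _ _ _ h0, pvHitsOf_neg _ _ _ _ h1a, pvHitsOf_neg _ _ _ _ h1b, pvHitsOf_neg _ _ _ _ h2a, pvHitsOf_neg _ _ _ _ h2b, pvHitsOf_neg _ _ _ _ h3, pvHitsOf_neg _ _ _ _ h4, pvHitsOf_pos _ _ _ _ h5, min?_cons_of_lb _ _ (pvHitsOf_lb _ _ _ (by decide))]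
              · rw [if_neg h5]
                rw [Bool.not_eq_true] at h5
                by_cases h6 : (PySem.Str.isIn "post code" (PySem.Str.lower text) || PySem.Str.isIn "pin" (PySem.Str.lower text)) = true
                · rw [if_pos h6]
                  by_cases h6a : PySem.Str.isIn "post code" (PySem.Str.lower text) = true
                  · rw [pvHitsOf_neg _ _ _ _ h0, pvHitsOf_neg _ _ _ _ h1a, pvHitsOf_neg _ _ _ _ h1b, pvHitsOf_neg _ _ _ _ h2a, pvHitsOf_neg _ _ _ _ h2b, pvHitsOf_neg _ _ _ _ h3, pvHitsOf_neg _ _ _ _ h4, pvHitsOf_neg _ _ _ _ h5, pvHitsOf_pos _ _ _ _ h6a, min?_cons_of_lb _ _ (pvHitsOf_lb _ _ _ (by decide))]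
                  · rw [Bool.not_eq_true] at h6a
                    have h6b : PySem.Str.isIn "pin" (PySem.Str.lower text) = true := by
                      rcases Bool.or_eq_true_iff.mp h6 with h | h
                      · rw [h6a] at h; exact absurd h (by simp)
                      · exact h
                    rw [pvHitsOf_neg _ _ _ _ h0, pvHitsOf_neg _ _ _ _ h1a, pvHitsOf_neg _ _ _ _ h1b, pvHitsOf_neg _ _ _ _ h2a, pvHitsOf_neg _ _ _ _ h2b, pvHitsOf_neg _ _ _ _ h3, pvHitsOf_neg _ _ _ _ h4, pvHitsOf_neg _ _ _ _ h5, pvHitsOf_neg _ _ _ _ h6a, pvHitsOf_pos _ _ _ _ h6b, min?_cons_of_lb _ _ (pvHitsOf_lb _ _ _ (by decide))]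
                · rw [if_neg h6]
                  rw [Bool.not_eq_true] at h6
                  obtain ⟨h6a, h6b⟩ := Bool.or_eq_false_iff.mp h6
                  by_cases h7 : PySem.Str.isIn "state*" (PySem.Str.lower text) = true
                  · rw [if_pos h7]
                    rw [pvHitsOf_neg _ _ _ _ h0, pvHitsOf_neg _ _ _ _ h1a, pvHitsOf_neg _ _ _ _ h1b, pvHitsOf_neg _ _ _ _ h2a, pvHitsOf_neg _ _ _ _ h2b, pvHitsOf_neg _ _ _ _ h3, pvHitsOf_neg _ _ _ _ h4, pvHitsOf_neg _ _ _ _ h5, pvHitsOf_neg _ _ _ _ h6a, pvHitsOf_neg _ _ _ _ h6b, pvHitsOf_pos _ _ _ _ h7, min?_cons_of_lb _ _ (pvHitsOf_lb _ _ _ (by decide))]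
                  · rw [if_neg h7]
                    rw [Bool.not_eq_true] at h7
                    by_cases h8 : PySem.Str.isIn "std code" (PySem.Str.lower text) = true
                    · rw [if_pos h8]
                      rw [pvHitsOf_neg _ _ _ _ h0, pvHitsOf_neg _ _ _ _ h1a, pvHitsOf_neg _ _ _ _ h1b, pvHitsOf_neg _ _ _ _ h2a, pvHitsOf_neg _ _ _ _ h2b, pvHitsOf_neg _ _ _ _ h3, pvHitsOf_neg _ _ _ _ h4, pvHitsOf_neg _ _ _ _ h5, pvHitsOf_neg _ _ _ _ h6a, pvHitsOf_neg _ _ _ _ h6b, pvHitsOf_neg _ _ _ _ h7, pvHitsOf_pos _ _ _ _ h8, min?_cons_of_lb _ _ (pvHitsOf_lb _ _ _ (by decide))]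
                    · rw [if_neg h8]
                      rw [Bool.not_eq_true] at h8
                      by_cases h9 : PySem.Str.isIn "tel" (PySem.Str.lower text) = true
                      · rw [if_pos h9]
                        rw [pvHitsOf_neg _ _ _ _ h0, pvHitsOf_neg _ _ _ _ h1a, pvHitsOf_neg _ _ _ _ h1b, pvHitsOf_neg _ _ _ _ h2a, pvHitsOf_neg _ _ _ _ h2b, pvHitsOf_neg _ _ _ _ h3, pvHitsOf_neg _ _ _ _ h4, pvHitsOf_neg _ _ _ _ h5, pvHitsOf_neg _ _ _ _ h6a, pvHitsOf_neg _ _ _ _ h6b, pvHitsOf_neg _ _ _ _ h7, pvHitsOf_neg _ _ _ _ h8, pvHitsOf_pos _ _ _ _ h9, min?_cons_of_lb _ _ (pvHitsOf_lb _ _ _ (by decide))]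
                      · rw [if_neg h9]
                        rw [Bool.not_eq_true] at h9
                        by_cases h10 : PySem.Str.isIn "mobile" (PySem.Str.lower text) = true
                        · rw [if_pos h10]
                          rw [pvHitsOf_neg _ _ _ _ h0, pvHitsOf_neg _ _ _ _ h1a, pvHitsOf_neg _ _ _ _ h1b, pvHitsOf_neg _ _ _ _ h2a, pvHitsOf_neg _ _ _ _ h2b, pvHitsOf_neg _ _ _ _ h3, pvHitsOf_neg _ _ _ _ h4, pvHitsOf_neg _ _ _ _ h5, pvHitsOf_neg _ _ _ _ h6a, pvHitsOf_neg _ _ _ _ h6b, pvHitsOf_neg _ _ _ _ h7, pvHitsOf_neg _ _ _ _ h8, pvHitsOf_neg _ _ _ _ h9, pvHitsOf_pos _ _ _ _ h10, min?_cons_of_lb _ _ (pvHitsOf_lb _ _ _ (by decide))]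
                        · rw [if_neg h10]
                          rw [Bool.not_eq_true] at h10
                          rw [pvHitsOf_neg _ _ _ _ h0, pvHitsOf_neg _ _ _ _ h1a, pvHitsOf_neg _ _ _ _ h1b, pvHitsOf_neg _ _ _ _ h2a, pvHitsOf_neg _ _ _ _ h2b, pvHitsOf_neg _ _ _ _ h3, pvHitsOf_neg _ _ _ _ h4, pvHitsOf_neg _ _ _ _ h5, pvHitsOf_neg _ _ _ _ h6a, pvHitsOf_neg _ _ _ _ h6b, pvHitsOf_neg _ _ _ _ h7, pvHitsOf_neg _ _ _ _ h8, pvHitsOf_neg _ _ _ _ h9, pvHitsOf_neg _ _ _ _ h10, pvHitsOf_nil]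
                          rfl

-- chunk fold: folding A's step equals folding inserts over B's events
theorem foldl_step_eq (chunks : List String) (d : PySem.Dict String String) :
    chunks.foldl pvStepA d =
      (chunks.filterMap pvClassify).foldl (fun d e => d.insert e.1 e.2) d := by
  induction chunks generalizing d with
  | nil => rfl
  | cons c cs ih =>
      rw [List.foldl_cons, List.filterMap_cons, pvStep_classify d c]
      cases hc : pvClassify c with
      | none => exact ih d
      | some e => simp only [List.foldl_cons]; exact ih _

-- line fold: A's nested loops equal folding inserts over B's flattened events
theorem foldl_lines_eq (lines : List String) (d : PySem.Dict String String) :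
    lines.foldl (fun d line => (pvSplit (PySem.Str.replace line ";" " ") ",,,").foldl pvStepA d) d =
      (lines.flatMap (fun line =>
        (pvSplit (PySem.Str.replace line ";" " ") ",,,").filterMap pvClassify)).foldl
        (fun d e => d.insert e.1 e.2) d := by
  induction lines generalizing d with
  | nil => rfl
  | cons l ls ih =>
      rw [List.foldl_cons, List.flatMap_cons, List.foldl_append, foldl_step_eq]
      exact ih _

-- ===== VERDICT (by name: the statement is the Claim_ definition above) =====
theorem process_company_address_spec : Claim_equal_process_company_address := by
  intro string _
  unfold Spec_process_company_address process_company_address process_company_address_alt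
  simp only [foldl_lines_eq]
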